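-- pv_equiv track=rewrite | github.com/russhustle/leetpattern | src/python/2101_2400/2107_number_of_unique_flavors_after_sharing_k_candies.py | shareCandies
-- ===== SOURCE A (Python) =====
-- from collections import Counter
-- from typing import List
--
-- def shareCandies(candies: List[int], k: int) -> int:
--     res = 0
--     n = len(candies)
--     counts = Counter(candies)
--
--     if k >= n:
--         return 0
--     if k == 0:
--         return len(counts)
--
--     for right in range(n):
--         counts[candies[right]] -= 1  # remove
--         if counts[candies[right]] == 0:
--             del counts[candies[right]]
--
--         if right < k - 1:  # form the window
--             continue
--
--         res = max(res, len(counts))  # update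
--
--         left = right - k + 1  # add
--         counts[candies[left]] += 1
--
--     return res
-- ===== SOURCE B (Python) =====
-- from typing import List
--
--
-- def shareCandies(candies: List[int], k: int) -> int:
--     # Brute force per window: distinct flavors outside each size-k window,
--     # measured directly with a set over the two remaining slices.
--     n = len(candies)
--     if k >= n:
--         return 0
--     if k == 0:
--         return len(set(candies))
--     best = 0
--     for s in range(n - k + 1):
--         best = max(best, len(set(candies[:s] + candies[s + k:])))
--     return best
-- ===== Notes on version B (the rewrite author's own statement) =====
-- stated objective: simpler
-- what changed: Replaces A's sliding-window Counter maintenance (decrement/delete/re-add with incremental distinct count) by a direct brute-force scan that, for each window start s, measures len(set(candies[:s] + candies[s+k:])) on the two remaining slices.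
import Mathlib
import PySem

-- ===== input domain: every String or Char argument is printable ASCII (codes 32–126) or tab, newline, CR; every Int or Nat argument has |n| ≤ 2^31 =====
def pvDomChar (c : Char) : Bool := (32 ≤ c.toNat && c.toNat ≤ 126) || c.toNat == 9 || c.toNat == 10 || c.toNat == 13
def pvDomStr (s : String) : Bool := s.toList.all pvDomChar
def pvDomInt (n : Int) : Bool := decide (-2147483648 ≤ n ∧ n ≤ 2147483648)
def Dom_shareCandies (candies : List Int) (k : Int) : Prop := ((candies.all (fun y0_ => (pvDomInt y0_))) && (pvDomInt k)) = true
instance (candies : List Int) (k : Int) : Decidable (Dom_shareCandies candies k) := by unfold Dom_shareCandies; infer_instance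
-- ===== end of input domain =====

-- B replaces A's sliding-window Counter bookkeeping by a per-window brute-force
-- distinct count over the two remaining slices (simpler decomposition, not faster).

-- ===== PORT A =====
-- the body of A's 'for right in range(n)' loop, acting on the state (counts, res)
def shareCandiesStep (candies : List Int) (k : Int)
    (st : PySem.Dict Int Int × Int) (right : Nat) : PySem.Dict Int Int × Int :=
  let counts := st.1
  let res := st.2
  let x := PySem.List.pyGetD candies (right : Int) 0
  let counts := counts.modify x 0 (· - 1)                              -- counts[candies[right]] -= 1
  let counts := if counts.getD x 0 = 0 then counts.erase x else counts -- del counts[...] on zero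
  if (right : Int) < k - 1 then (counts, res)                          -- still forming the window
  else
    let res := max res (counts.size : Int)                             -- res = max(res, len(counts))
    let left := (right : Int) - k + 1
    let y := PySem.List.pyGetD candies left 0
    (counts.modify y 0 (· + 1), res)                                   -- counts[candies[left]] += 1

def shareCandies (candies : List Int) (k : Int) : Int :=
  let n := candies.length
  let counts := PySem.Dict.counter candies
  if k ≥ (n : Int) then 0
  else if k = 0 then (counts.size : Int)
  else ((List.range n).foldl (shareCandiesStep candies k) (counts, 0)).2

-- ===== PORT B =====
def shareCandies_alt (candies : List Int) (k : Int) : Int :=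
  let n := candies.length
  if k ≥ (n : Int) then 0
  else if k = 0 then ((PySem.Set.ofList candies).length : Int)
  else
    (PySem.List.pyRange 0 ((n : Int) - k + 1) 1).foldl
      (fun best s =>
        max best ((PySem.Set.ofList
          (PySem.List.slice candies none (some s) ++
           PySem.List.slice candies (some (s + k)) none)).length : Int))
      0

-- ===== PRECONDITION & SPEC =====
-- Pre_ excludes only k < 0 with a nonempty list: there A's left index right-k+1
-- eventually exceeds the list length and Python raises IndexError.
def Pre_shareCandies (candies : List Int) (k : Int) : Prop := 0 ≤ k ∨ candies = []
instance (candies : List Int) (k : Int) : Decidable (Pre_shareCandies candies k) := by unfold Pre_shareCandies; infer_instance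
def pvWitness_shareCandies : List Int × Int := ([1, 2, 2, 3, 1], 2)

def Spec_shareCandies (candies : List Int) (k : Int) (out : Int) : Prop := out = shareCandies_alt candies k
instance (candies : List Int) (k : Int) (out : Int) : Decidable (Spec_shareCandies candies k out) := by unfold Spec_shareCandies; infer_instance

-- ===== CLAIM (what is proved, stated in full; the proofs are below) =====
def Claim_equal_shareCandies : Prop := ∀ (candies : List Int) (k : Int), Dom_shareCandies candies k → Pre_shareCandies candies k → Spec_shareCandies candies k (shareCandies candies k)

-- ===== LEMMAS AND PROOFS =====

def RepCnt (d : PySem.Dict Int Int) (l : List Int) : Prop :=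
  d.keys.Nodup ∧ (∀ x : Int, d.getD x 0 = (l.count x : Int)) ∧ (∀ x : Int, x ∈ d.keys ↔ 0 < l.count x)


theorem dict_get?_erase (d : PySem.Dict Int Int) (k x : Int) :
    (d.erase k).get? x = if x = k then none else d.get? x := by
  obtain ⟨items⟩ := d
  induction items with
  | nil => simp [PySem.Dict.erase, PySem.Dict.get?]
  | cons p rest ih =>
    simp only [PySem.Dict.erase, PySem.Dict.get?, List.filter_cons] at *
    by_cases hpk : p.1 = k <;> by_cases hpx : p.1 = x <;>
      simp_all [beq_iff_eq]


theorem dict_getD_erase (d : PySem.Dict Int Int) (k x : Int) (v : Int) :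
    (d.erase k).getD x v = if x = k then v else d.getD x v := by
  simp [PySem.Dict.getD, dict_get?_erase]
  split <;> rfl


theorem dict_keys_erase (d : PySem.Dict Int Int) (k : Int) :
    (d.erase k).keys = d.keys.filter (fun a => !(a == k)) := by
  obtain ⟨items⟩ := d
  simp [PySem.Dict.erase, PySem.Dict.keys, List.filter_map]
  rfl


theorem repcnt_size (d : PySem.Dict Int Int) (l : List Int) (h : RepCnt d l) :
    (d.size : Int) = ((PySem.Set.ofList l).length : Int) := by
  obtain ⟨h1, _, h3⟩ := h
  have hperm : d.keys.Perm (PySem.Set.ofList l) := by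
    rw [List.perm_ext_iff_of_nodup h1 (PySem.Set.nodup_ofList l)]
    intro x
    rw [h3, PySem.Set.mem_ofList, List.count_pos_iff]
  have hlen : d.keys.length = (PySem.Set.ofList l).length := hperm.length_eq
  have : d.size = d.keys.length := by
    simp [PySem.Dict.size, PySem.Dict.keys]
  rw [this, hlen]


theorem repcnt_modify_keys (d : PySem.Dict Int Int) (x : Int) (f : Int → Int)
    (h : d.keys.Nodup) : (d.modify x 0 f).keys.Nodup := by
  rw [PySem.Dict.keys_modify]
  exact PySem.Dict.nodup_keys_insert _ _ _ h


theorem mem_keys_modify (d : PySem.Dict Int Int) (x z : Int) (f : Int → Int) :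
    z ∈ (d.modify x 0 f).keys ↔ z = x ∨ z ∈ d.keys := by
  rw [PySem.Dict.keys_modify]
  exact PySem.Dict.mem_keys_insert _ _ _ _


theorem repcnt_dec (d : PySem.Dict Int Int) (l l' : List Int) (x : Int)
    (h : RepCnt d l) (hx : 0 < l.count x)
    (hc : ∀ y : Int, (l'.count y : Int) = (l.count y : Int) - (if y = x then 1 else 0)) :
    RepCnt (if (d.modify x 0 (· - 1)).getD x 0 = 0
            then (d.modify x 0 (· - 1)).erase x
            else d.modify x 0 (· - 1)) l' := by
  obtain ⟨h1, h2, h3⟩ := h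
  have hm := repcnt_modify_keys d x (· - 1) h1
  have hgd : ∀ y : Int, (d.modify x 0 (· - 1)).getD y 0 = (l'.count y : Int) := by
    intro y
    rw [PySem.Dict.getD_modify, hc y]
    by_cases hyx : y = x
    · subst hyx; rw [if_pos rfl, if_pos rfl, h2]
    · rw [if_neg hyx, if_neg hyx, h2]; ring
  have hmem : ∀ z : Int, z ∈ (d.modify x 0 (· - 1)).keys ↔ z = x ∨ 0 < l.count z := by
    intro z; rw [mem_keys_modify, h3]
  split
  · -- deleted: count of x in l' is 0
    next h0 =>
    have hx0 : (l'.count x : Int) = 0 := by rw [← hgd x]; exact h0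
    refine ⟨?_, fun y => ?_, fun z => ?_⟩
    · rw [dict_keys_erase]; exact hm.filter _
    · rw [dict_getD_erase]
      by_cases hyx : y = x
      · subst hyx; rw [if_pos rfl, hx0]
      · rw [if_neg hyx, hgd]
    · rw [dict_keys_erase, List.mem_filter]
      simp only [Bool.not_eq_eq_eq_not, Bool.not_true, beq_eq_false_iff_ne, ne_eq, hmem]
      constructor
      · rintro ⟨hz, hzx⟩
        have h0l : 0 < l.count z := hz.resolve_left hzx
        have hcz := hc z
        rw [if_neg hzx] at hcz
        omega
      · intro hz
        by_cases hzx : z = x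
        · subst hzx; omega
        · have hcz := hc z
          rw [if_neg hzx] at hcz
          exact ⟨Or.inr (by omega), hzx⟩
  · next h0 =>
    have hxpos : (l'.count x : Int) ≠ 0 := by rw [← hgd x]; exact h0
    refine ⟨hm, hgd, fun z => ?_⟩
    rw [hmem]
    by_cases hzx : z = x
    · subst hzx
      constructor
      · intro _; omega
      · intro _; exact Or.inl rfl
    · have hcz := hc z
      rw [if_neg hzx] at hcz
      constructor
      · rintro (h | h); · exact absurd h hzx
        omega
      · intro h; exact Or.inr (by omega)


theorem repcnt_inc (d : PySem.Dict Int Int) (l l' : List Int) (y : Int)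
    (h : RepCnt d l)
    (hc : ∀ z : Int, (l'.count z : Int) = (l.count z : Int) + (if z = y then 1 else 0)) :
    RepCnt (d.modify y 0 (· + 1)) l' := by
  obtain ⟨h1, h2, h3⟩ := h
  refine ⟨repcnt_modify_keys d y (· + 1) h1, fun z => ?_, fun z => ?_⟩
  · rw [PySem.Dict.getD_modify, hc z]
    by_cases hzy : z = y
    · subst hzy; rw [if_pos rfl, if_pos rfl, h2]
    · rw [if_neg hzy, if_neg hzy, h2]; ring
  · rw [mem_keys_modify, h3]
    have hcz := hc z
    by_cases hzy : z = y
    · subst hzy; rw [if_pos rfl] at hcz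
      constructor
      · intro _; omega
      · intro _; exact Or.inl rfl
    · rw [if_neg hzy] at hcz
      constructor
      · rintro (h | h); · exact absurd h hzy
        omega
      · intro h; exact Or.inr (by omega)


theorem count_drop_step (candies pre : List Int) (j : Nat) (hj : j < candies.length) :
    ∀ y : Int, (((pre ++ candies.drop (j+1)).count y : Int)) =
      ((pre ++ candies.drop j).count y : Int) - (if y = candies[j] then 1 else 0) := by
  intro y
  rw [List.drop_eq_getElem_cons hj]
  simp only [List.count_append, List.count_cons, beq_iff_eq]
  by_cases h : candies[j] = y
  · subst h; simp; omega
  · rw [if_neg h, if_neg (fun hh => h hh.symm)]; push_cast; ring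


theorem count_take_step (candies suf : List Int) (s : Nat) (hs : s < candies.length) :
    ∀ y : Int, ((candies.take (s+1) ++ suf).count y : Int) =
      ((candies[s] :: (candies.take s ++ suf)).count y : Int) := by
  intro y
  rw [List.take_add_one]
  have : candies[s]?.toList = [candies[s]] := by simp [List.getElem?_eq_getElem hs]
  rw [this]
  simp only [List.count_append, List.count_cons, List.count_nil, beq_iff_eq]
  push_cast; omega


theorem shareCandies_phase1 (candies : List Int) (k : Int) :
    ∀ (m j : Nat) (d : PySem.Dict Int Int) (res : Int),
      ((j : Int) + m ≤ k - 1) → j + m ≤ candies.length →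
      RepCnt d (candies.drop j) →
      ∃ d', (List.range' j m).foldl (shareCandiesStep candies k) (d, res) = (d', res) ∧
            RepCnt d' (candies.drop (j + m)) := by
  intro m
  induction m with
  | zero => intro j d res _ _ hrep; exact ⟨d, by simp, by simpa using hrep⟩
  | succ m ih =>
    intro j d res hk hn hrep
    have hjn : j < candies.length := by omega
    have hcond : (j : Int) < k - 1 := by push_cast at hk; omega
    have hstep : shareCandiesStep candies k (d, res) j =
        (if (d.modify candies[j] 0 (· - 1)).getD candies[j] 0 = 0
         then (d.modify candies[j] 0 (· - 1)).erase candies[j]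
         else d.modify candies[j] 0 (· - 1), res) := by
      show shareCandiesStep candies k (d, res) j = _
      unfold shareCandiesStep
      rw [PySem.List.pyGetD_ofNat candies j 0 hjn]
      simp only [if_pos hcond]
    have hrep' : RepCnt (if (d.modify candies[j] 0 (· - 1)).getD candies[j] 0 = 0
         then (d.modify candies[j] 0 (· - 1)).erase candies[j]
         else d.modify candies[j] 0 (· - 1)) (candies.drop (j+1)) := by
      apply repcnt_dec d (candies.drop j) _ candies[j] hrep
      · rw [List.count_pos_iff, List.drop_eq_getElem_cons hjn]; exact List.mem_cons_self ..
      · intro y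
        have := count_drop_step candies [] j hjn y
        simpa using this
    rw [List.range'_succ]
    simp only [List.foldl_cons, hstep]
    obtain ⟨d', heq, hrep''⟩ := ih (j+1) _ res (by push_cast at hk ⊢; omega) (by omega) hrep'
    refine ⟨d', heq, ?_⟩
    have : j + 1 + m = j + (m + 1) := by omega
    rwa [this] at hrep''


def outsideG (candies : List Int) (kn : Nat) (s : Nat) : Int :=
  ((PySem.Set.ofList (candies.take s ++ candies.drop (s + kn))).length : Int)


theorem shareCandies_phase2 (candies : List Int) (k : Int) (kn : Nat)
    (hk : k = (kn : Int)) (hk1 : 1 ≤ kn) :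
    ∀ (m j : Nat) (d : PySem.Dict Int Int) (res : Int),
      kn ≤ j + 1 → j + m = candies.length →
      RepCnt d (candies.take (j + 1 - kn) ++ candies.drop j) →
      ((List.range' j m).foldl (shareCandiesStep candies k) (d, res)).2 =
        (List.range' (j + 1 - kn) m).foldl (fun b s => max b (outsideG candies kn s)) res := by
  intro m
  induction m with
  | zero => intro j d res _ _ _; simp
  | succ m ih =>
    intro j d res hkj hjm hrep
    have hjn : j < candies.length := by omega
    have hsn : j + 1 - kn < candies.length := by omega
    have hcond : ¬ ((j : Int) < k - 1) := by subst hk; omega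
    set x := candies[j] with hxdef
    set c2 := (if (d.modify x 0 (· - 1)).getD x 0 = 0
         then (d.modify x 0 (· - 1)).erase x
         else d.modify x 0 (· - 1)) with hc2
    have hrep2 : RepCnt c2 (candies.take (j + 1 - kn) ++ candies.drop (j + 1)) := by
      apply repcnt_dec d (candies.take (j + 1 - kn) ++ candies.drop j) _ x hrep
      · rw [List.count_pos_iff, List.mem_append, List.drop_eq_getElem_cons hjn]
        exact Or.inr (List.mem_cons_self ..)
      · exact count_drop_step candies _ j hjn
    have hsize : (c2.size : Int) = outsideG candies kn (j + 1 - kn) := by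
      rw [repcnt_size c2 _ hrep2, outsideG]
      have : j + 1 - kn + kn = j + 1 := by omega
      rw [this]
    have hleft : ((j : Int) - k + 1) = ((j + 1 - kn : Nat) : Int) := by
      subst hk; omega
    set y := candies[j + 1 - kn] with hydef
    have hstep : shareCandiesStep candies k (d, res) j =
        (c2.modify y 0 (· + 1), max res (c2.size : Int)) := by
      show shareCandiesStep candies k (d, res) j = _
      unfold shareCandiesStep
      rw [PySem.List.pyGetD_ofNat candies j 0 hjn]
      simp only [if_neg hcond, ← hxdef, ← hc2]
      rw [hleft, PySem.List.pyGetD_ofNat candies _ 0 hsn]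
    have hrep3 : RepCnt (c2.modify y 0 (· + 1))
        (candies.take (j + 1 + 1 - kn) ++ candies.drop (j + 1)) := by
      apply repcnt_inc c2 (candies.take (j + 1 - kn) ++ candies.drop (j + 1)) _ y hrep2
      intro z
      have h1 : j + 1 + 1 - kn = (j + 1 - kn) + 1 := by omega
      rw [h1, count_take_step candies _ (j + 1 - kn) hsn z]
      simp only [List.count_cons, beq_iff_eq, ← hydef]
      by_cases hzy : z = y
      · subst hzy; simp
      · rw [if_neg hzy, if_neg (fun hh => hzy hh.symm)]; push_cast; ring
    rw [List.range'_succ, List.range'_succ]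
    simp only [List.foldl_cons, hstep]
    have harith : j + 1 - kn + 1 = j + 1 + 1 - kn := by omega
    rw [harith, ih (j + 1) (c2.modify y 0 (· + 1)) (max res (c2.size : Int))
      (by omega) (by omega) hrep3, hsize]


theorem repcnt_counter (l : List Int) : RepCnt (PySem.Dict.counter l) l := by
  refine ⟨?_, fun x => PySem.Dict.getD_counter l x, fun x => ?_⟩
  · rw [PySem.Dict.keys_counter]; exact PySem.Set.nodup_ofList l
  · rw [PySem.Dict.keys_counter, PySem.Set.mem_ofList, List.count_pos_iff]


theorem foldl_max_zero (l : List Int) :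
    l.foldl (fun (b : Int) (_ : Int) => max b 0) 0 = 0 := by
  induction l with
  | nil => rfl
  | cons a l ih => simpa using ih


theorem shareCandies_spec' (candies : List Int) (k : Int) (h : 0 ≤ k ∨ candies = []) :
    shareCandies candies k = shareCandies_alt candies k := by
  unfold shareCandies shareCandies_alt
  by_cases hge : k ≥ (candies.length : Int)
  · simp [hge]
  · simp only [if_neg hge]
    by_cases hk0 : k = 0
    · simp only [if_pos hk0]
      exact repcnt_size _ _ (repcnt_counter candies)
    · simp only [if_neg hk0]
      rcases h with hk | hnil
      · have hkpos : 0 < k := lt_of_le_of_ne hk (Ne.symm hk0)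
        lift k to ℕ using hk with kn
        have hk1 : 1 ≤ kn := by exact_mod_cast hkpos
        have hkn : kn < candies.length := by omega
        rw [List.range_eq_range']
        have hsplit : List.range' 0 candies.length =
            List.range' 0 (kn - 1) ++ List.range' (kn - 1) (candies.length - (kn - 1)) := by
          rw [(by omega : candies.length = (kn - 1) + (candies.length - (kn - 1)))]
          rw [← List.range'_append]
          simp
        rw [hsplit, List.foldl_append]
        obtain ⟨d1, heq1, hrep1⟩ := shareCandies_phase1 candies (kn : Int) (kn - 1) 0
          (PySem.Dict.counter candies) 0 (by push_cast; omega) (by omega)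
          (by simpa using repcnt_counter candies)
        rw [heq1]
        have hrepin : RepCnt d1 (candies.take ((kn - 1) + 1 - kn) ++ candies.drop (kn - 1)) := by
          have : (kn - 1) + 1 - kn = 0 := by omega
          rw [this, List.take_zero, List.nil_append]
          simpa using hrep1
        rw [shareCandies_phase2 candies (kn : Int) kn rfl hk1 (candies.length - (kn - 1))
          (kn - 1) d1 0 (by omega) (by omega) hrepin]
        rw [PySem.List.pyRange_one, List.foldl_map]
        have hlist : List.range (((candies.length : Int) - (kn : Int) + 1 - 0).toNat) =
            List.range' ((kn - 1) + 1 - kn) (candies.length - (kn - 1)) := by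
          rw [List.range_eq_range']
          congr 1
          · omega
          · omega
        rw [hlist]
        apply PySem.List.foldl_congr_mem
        intro b t _
        have h1 : (0 : Int) + (t : Int) = ((t : Nat) : Int) := by omega
        rw [h1, PySem.List.slice_to_natCast]
        have h2 : ((t : Nat) : Int) + (kn : Int) = ((t + kn : Nat) : Int) := by push_cast; ring
        rw [h2, PySem.List.slice_from_natCast]
        rfl
      · subst hnil
        simp only [List.length_nil, Nat.cast_zero, List.range_zero, List.foldl_nil]
        have hsl : ∀ a b, PySem.List.slice ([] : List Int) a b = [] := by
          intro a b
          cases a <;> cases b <;> simp [PySem.List.slice]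
        rw [PySem.List.foldl_congr_mem _ _ (fun (b : Int) (_ : Int) => max b 0) 0
          (by intro b s _; rw [hsl, hsl]; rfl)]
        exact (foldl_max_zero _).symm

-- ===== VERDICT (by name: the statement is the Claim_ definition above) =====
theorem shareCandies_spec : Claim_equal_shareCandies := by
  intro candies k _ hpre
  exact shareCandies_spec' candies k hpre
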